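-- pv_equiv track=rewrite | github.com/HuiyuanZheng02/Python_2023Spring | Practice/practices2-sol/triple-value-sol.py | triple_value_list
-- ===== SOURCE A (Python) =====
-- def triple_value_list(list_, value):
--     """将列表中相应的值替换为3个同样的值，要求原地修改列表
--         比如triple_value_list([1,2,3,1,1], 1)，列表变为[1,1,1,2,3,1,1,1,1,1,1]
--     """
--
--     i = 0
--     while i < len(list_):
--         if list_[i] == value:
--             list_[i:i] = [value, value]
--             i += 3
--         else:
--             i += 1
--     return list_
-- ===== SOURCE B (Python) =====
-- def triple_value_list(list_, value):
--     list_[:] = [y for x in list_ for y in ((x, x, x) if x == value else (x,))]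
--     return list_
-- ===== Notes on version B (the rewrite author's own statement) =====
-- stated objective: simpler
-- what changed: Replaces A's index-walking scan with repeated in-place slice insertions by a single flattening comprehension written back with one slice assignment.
import Mathlib
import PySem

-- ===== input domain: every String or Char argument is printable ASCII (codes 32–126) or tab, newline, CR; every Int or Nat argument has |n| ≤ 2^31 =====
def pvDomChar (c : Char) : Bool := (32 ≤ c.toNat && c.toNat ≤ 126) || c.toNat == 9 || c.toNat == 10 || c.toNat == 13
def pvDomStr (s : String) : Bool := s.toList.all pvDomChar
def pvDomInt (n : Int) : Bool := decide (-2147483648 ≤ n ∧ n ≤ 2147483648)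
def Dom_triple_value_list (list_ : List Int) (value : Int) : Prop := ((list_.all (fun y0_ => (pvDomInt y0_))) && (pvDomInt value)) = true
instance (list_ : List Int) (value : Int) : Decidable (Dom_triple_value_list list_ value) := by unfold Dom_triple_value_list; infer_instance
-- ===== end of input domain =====

-- B builds the tripled list in one flattening pass instead of A's repeated in-place
-- slice insertions; both Pythons mutate list_ in place and return the same object —
-- the equivalence proved here is about the returned value.

-- ===== PORT A =====
-- while i < len(list_): if list_[i] == value: list_[i:i] = [value, value]; i += 3 else i += 1
def tvGo (value : Int) (l : List Int) (i : Nat) : List Int :=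
  if h : i < l.length then
    if l[i] = value then
      tvGo value (l.take i ++ [value, value] ++ l.drop i) (i + 3)
    else
      tvGo value l (i + 1)
  else l
termination_by l.length - i
decreasing_by
  · simp only [List.length_append, List.length_take, List.length_drop, List.length_cons,
      List.length_nil]
    omega
  · omega

def triple_value_list (list_ : List Int) (value : Int) : List Int :=
  tvGo value list_ 0

-- ===== PORT B =====
-- list_[:] = [y for x in list_ for y in ((x, x, x) if x == value else (x,))]
def triple_value_list_alt (list_ : List Int) (value : Int) : List Int :=
  list_.flatMap (fun x => if x = value then [x, x, x] else [x])

-- ===== PRECONDITION & SPEC =====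
def Spec_triple_value_list (list_ : List Int) (value : Int) (out : List Int) : Prop := out = triple_value_list_alt list_ value
instance (list_ : List Int) (value : Int) (out : List Int) : Decidable (Spec_triple_value_list list_ value out) := by unfold Spec_triple_value_list; infer_instance

-- ===== CLAIM (what is proved, stated in full; the proofs are below) =====
def Claim_equal_triple_value_list : Prop := ∀ (list_ : List Int) (value : Int), Dom_triple_value_list list_ value → Spec_triple_value_list list_ value (triple_value_list list_ value)

-- ===== LEMMAS AND PROOFS =====

-- ===== VERDICT (by name: the statement is the Claim_ definition above) =====
lemma tvGo_eq (value : Int) :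
    ∀ (n : Nat) (l : List Int) (i : Nat), l.length - i = n →
      tvGo value l i =
        l.take i ++ (l.drop i).flatMap (fun x => if x = value then [x, x, x] else [x]) := by
  intro n
  induction n with
  | zero =>
    intro l i hn
    rw [tvGo]
    have hi : ¬ i < l.length := by omega
    rw [dif_neg hi]
    have ht := List.take_of_length_le (l := l) (show l.length ≤ i by omega)
    have hd := List.drop_of_length_le (l := l) (show l.length ≤ i by omega)
    simp [ht, hd]
  | succ n ih =>
    intro l i hn
    have h : i < l.length := by omega
    rw [tvGo, dif_pos h]
    have hti : (l.take i).length = i := by simp; omega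
    by_cases he : l[i] = value
    · rw [if_pos he]
      have hlen : (l.take i ++ [value, value] ++ l.drop i).length - (i + 3) = n := by
        simp only [List.length_append, List.length_cons, List.length_nil, hti,
          List.length_drop]
        omega
      rw [ih _ _ hlen]
      have e1 : l.take i ++ [value, value] ++ l.drop i
          = l.take i ++ ([value, value] ++ l.drop i) := by
        simp [List.append_assoc]
      have h3 : i + 3 = (l.take i).length + 3 := by rw [hti]
      rw [e1, h3, List.take_length_add_append, List.drop_length_add_append,
        List.drop_eq_getElem_cons h]
      simp [he]
    · rw [if_neg he, ih l (i + 1) (by omega)]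
      conv_rhs => rw [List.drop_eq_getElem_cons h, List.flatMap_cons, if_neg he]
      rw [List.take_succ_eq_append_getElem h, List.append_assoc, List.singleton_append]

theorem triple_value_list_spec : Claim_equal_triple_value_list := by
  intro l v _
  unfold Spec_triple_value_list triple_value_list triple_value_list_alt
  simpa using tvGo_eq v l.length l 0 (by omega)
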